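-- pv_equiv track=rewrite | github.com/ByteOrderMarc/picross-randomizer | rom_data.py | decode_solution_bitfield
-- ===== SOURCE A (Python) =====
-- def decode_solution_bitfield(rom, offset, size, cols, rows):
--     """Decode LSB-first packed bitfield into a 2D grid of bools."""
--     total_cells = cols * rows
--     grid = []
--     bit_index = 0
--
--     for r in range(rows):
--         row = []
--         for c in range(cols):
--             byte_idx = bit_index // 8
--             bit_pos = bit_index % 8
--             if byte_idx < size:
--                 bit = (rom[offset + byte_idx] >> bit_pos) & 1
--             else:
--                 bit = 0
--             row.append(bool(bit))
--             bit_index += 1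
--         grid.append(row)
--
--     return grid
-- ===== SOURCE B (Python) =====
-- def decode_solution_bitfield(rom, offset, size, cols, rows):
--     """Decode LSB-first packed bitfield into a 2D grid of bools (byte-at-a-time)."""
--     total = cols * rows if rows > 0 and cols > 0 else 0
--     nbytes = min(size, (total + 7) // 8) if total > 0 else 0
--     flat = []
--     for i in range(nbytes):
--         b = rom[offset + i]
--         for bit in range(8):
--             flat.append(bool((b >> bit) & 1))
--     if len(flat) < total:
--         flat.extend([False] * (total - len(flat)))
--     else:
--         flat = flat[:total]
--     return [flat[r * cols:(r + 1) * cols] for r in range(rows)]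
-- ===== Notes on version B (the rewrite author's own statement) =====
-- stated objective: alternative
-- what changed: B decodes byte-at-a-time: it expands each of the min(size, ceil(cols*rows/8)) touched ROM bytes into 8 bits of a flat list, pads/truncates that list to exactly cols*rows bits, and reshapes it into rows by slicing, instead of A's per-cell recomputation of byte/bit indices from a running bit counter.
import Mathlib
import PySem

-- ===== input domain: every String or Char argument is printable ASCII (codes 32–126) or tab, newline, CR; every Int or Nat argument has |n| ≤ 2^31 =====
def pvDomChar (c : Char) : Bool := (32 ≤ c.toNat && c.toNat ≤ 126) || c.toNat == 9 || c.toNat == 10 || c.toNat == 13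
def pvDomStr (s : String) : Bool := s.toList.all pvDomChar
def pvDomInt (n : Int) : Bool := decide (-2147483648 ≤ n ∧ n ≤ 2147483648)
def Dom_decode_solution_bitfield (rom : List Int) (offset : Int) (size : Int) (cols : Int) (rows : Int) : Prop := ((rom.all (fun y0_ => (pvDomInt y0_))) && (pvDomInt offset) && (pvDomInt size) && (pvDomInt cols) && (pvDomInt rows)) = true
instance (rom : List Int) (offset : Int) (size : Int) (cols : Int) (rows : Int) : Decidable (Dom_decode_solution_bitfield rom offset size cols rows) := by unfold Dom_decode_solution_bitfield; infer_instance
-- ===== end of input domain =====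

-- B decodes the touched ROM bytes one byte at a time into a flat bit list, pads/truncates it to
-- cols*rows and reshapes by slicing; equal to A's per-cell decoding wherever Python A returns.

-- ===== PORT A =====
-- loop body of A's inner `for c in range(cols)` loop (state: row so far, bit_index)
def pvAInner (rom : List Int) (offset : Int) (size : Int) (st2 : List Bool × Int) (_ : Int) : List Bool × Int :=
  let byte_idx := PySem.Int.floordiv st2.2 8
  let bit_pos := PySem.Int.mod st2.2 8
  let bit : Int :=
    if byte_idx < size then
      PySem.Int.band ((PySem.List.pyGetD rom (offset + byte_idx) 0) >>> bit_pos.toNat) 1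
    else 0
  (st2.1 ++ [decide (bit ≠ 0)], st2.2 + 1)

-- loop body of A's outer `for r in range(rows)` loop (state: grid so far, bit_index)
def pvAOuter (rom : List Int) (offset : Int) (size : Int) (cols : Int)
    (st : List (List Bool) × Int) (_ : Int) : List (List Bool) × Int :=
  let inner := (PySem.List.pyRange 0 cols 1).foldl (pvAInner rom offset size) (([] : List Bool), st.2)
  (st.1 ++ [inner.1], inner.2)

def decode_solution_bitfield (rom : List Int) (offset : Int) (size : Int) (cols : Int) (rows : Int) : List (List Bool) :=
  ((PySem.List.pyRange 0 rows 1).foldl (pvAOuter rom offset size cols)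
    (([] : List (List Bool)), (0 : Int))).1

-- ===== PORT B =====
-- body of B's `for i in range(nbytes)` loop: append the 8 LSB-first bits of rom[offset+i]
def pvBByte (rom : List Int) (offset : Int) (acc : List Bool) (i : Int) : List Bool :=
  let b := PySem.List.pyGetD rom (offset + i) 0
  acc ++ (PySem.List.pyRange 0 8 1).map (fun bit => decide (PySem.Int.band (b >>> bit.toNat) 1 ≠ 0))

def decode_solution_bitfield_alt (rom : List Int) (offset : Int) (size : Int) (cols : Int) (rows : Int) : List (List Bool) :=
  let total : Int := if 0 < rows ∧ 0 < cols then cols * rows else 0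
  let nbytes : Int := if 0 < total then min size (PySem.Int.floordiv (total + 7) 8) else 0
  let flat := (PySem.List.pyRange 0 nbytes 1).foldl (pvBByte rom offset) []
  let flat2 := if (flat.length : Int) < total then flat ++ List.replicate (total - (flat.length : Int)).toNat false
               else PySem.List.slice flat none (some total)
  (PySem.List.pyRange 0 rows 1).map fun r => PySem.List.slice flat2 (some (r * cols)) (some ((r + 1) * cols))

-- ===== PRECONDITION & SPEC =====
-- Pre_ excludes exactly the inputs on which Python A raises IndexError: some touched byte index
-- offset+i (0 ≤ i < min(size, ceil(cols*rows/8)), only when cols>0 and rows>0) is out of Python range.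
def Pre_decode_solution_bitfield (rom : List Int) (offset : Int) (size : Int) (cols : Int) (rows : Int) : Prop :=
  0 < cols → 0 < rows →
    0 < min size (PySem.Int.floordiv (cols * rows + 7) 8) →
      PySem.Raise.InRange rom.length offset ∧
        PySem.Raise.InRange rom.length (offset + min size (PySem.Int.floordiv (cols * rows + 7) 8) - 1)
instance (rom : List Int) (offset : Int) (size : Int) (cols : Int) (rows : Int) : Decidable (Pre_decode_solution_bitfield rom offset size cols rows) := by unfold Pre_decode_solution_bitfield; infer_instance

def pvWitness_decode_solution_bitfield : List Int × Int × Int × Int × Int := ([3], 0, 1, 2, 2)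

def Spec_decode_solution_bitfield (rom : List Int) (offset : Int) (size : Int) (cols : Int) (rows : Int) (out : List (List Bool)) : Prop := out = decode_solution_bitfield_alt rom offset size cols rows
instance (rom : List Int) (offset : Int) (size : Int) (cols : Int) (rows : Int) (out : List (List Bool)) : Decidable (Spec_decode_solution_bitfield rom offset size cols rows out) := by unfold Spec_decode_solution_bitfield; infer_instance

-- ===== CLAIM (what is proved, stated in full; the proofs are below) =====
def Claim_equal_decode_solution_bitfield : Prop := ∀ (rom : List Int) (offset : Int) (size : Int) (cols : Int) (rows : Int), Dom_decode_solution_bitfield rom offset size cols rows → Pre_decode_solution_bitfield rom offset size cols rows → Spec_decode_solution_bitfield rom offset size cols rows (decode_solution_bitfield rom offset size cols rows)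

-- ===== LEMMAS AND PROOFS =====

-- the raw LSB-first bit k of the packed field (no size cutoff)
def pvRaw (rom : List Int) (offset : Int) (k : Nat) : Bool :=
  decide (PySem.Int.band ((PySem.List.pyGetD rom (offset + ((k / 8 : Nat) : Int)) 0) >>> (k % 8)) 1 ≠ 0)

-- bit k as A computes it: 0 beyond the size cutoff
def pvBit (rom : List Int) (offset : Int) (size : Int) (k : Nat) : Bool :=
  if ((k / 8 : Nat) : Int) < size then pvRaw rom offset k else false

lemma pvA_inner_fold (rom : List Int) (offset size : Int) (l : List Int) (acc : List Bool) (b : Nat) :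
    l.foldl (pvAInner rom offset size) (acc, (b : Int)) =
      (acc ++ (List.range l.length).map (fun c => pvBit rom offset size (b + c)),
       ((b + l.length : Nat) : Int)) := by
  induction l generalizing acc b with
  | nil => simp
  | cons x t ih =>
    have hstep : pvAInner rom offset size (acc, (b : Int)) x =
        (acc ++ [pvBit rom offset size b], ((b + 1 : Nat) : Int)) := by
      unfold pvAInner pvBit pvRaw
      have hdiv : PySem.Int.floordiv (b : Int) 8 = ((b / 8 : Nat) : Int) := by
        exact_mod_cast PySem.Int.floordiv_natCast b 8
      have hmod : PySem.Int.mod (b : Int) 8 = ((b % 8 : Nat) : Int) := by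
        exact_mod_cast PySem.Int.mod_natCast b 8
      simp only [hdiv, hmod, Int.toNat_natCast]
      simp
    have harg : ∀ c : Nat, b + 1 + c = b + (c + 1) := by omega
    rw [List.foldl_cons, hstep, ih, Prod.mk.injEq]
    constructor
    · simp [List.range_succ_eq_map, List.map_map, Function.comp_def, harg, List.append_assoc]
    · simp only [List.length_cons]; push_cast; ring

lemma pvA_outer_fold (rom : List Int) (offset size cols : Int) (l : List Int)
    (acc : List (List Bool)) (b : Nat) :
    l.foldl (pvAOuter rom offset size cols) (acc, (b : Int)) =
      (acc ++ (List.range l.length).map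
          (fun r => (List.range cols.toNat).map (fun c => pvBit rom offset size (b + r * cols.toNat + c))),
       ((b + l.length * cols.toNat : Nat) : Int)) := by
  induction l generalizing acc b with
  | nil => simp
  | cons x t ih =>
    have hlen : (PySem.List.pyRange 0 cols 1).length = cols.toNat := by
      simp [PySem.List.length_pyRange_one]
    have hstep : pvAOuter rom offset size cols (acc, (b : Int)) x =
        (acc ++ [(List.range cols.toNat).map (fun c => pvBit rom offset size (b + c))],
         ((b + cols.toNat : Nat) : Int)) := by
      unfold pvAOuter
      rw [pvA_inner_fold, hlen]
      simp
    rw [List.foldl_cons, hstep, ih, Prod.mk.injEq]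
    constructor
    · simp only [List.range_succ_eq_map, List.map_cons, List.map_map, Function.comp_def,
        List.length_cons]
      rw [List.append_assoc]
      congr 1
      rw [List.cons_append, List.nil_append]
      congr 1
      · apply List.map_congr_left; intro c _; congr 1; ring
      · apply List.map_congr_left; intro r _
        apply List.map_congr_left; intro c _
        congr 1; rw [Nat.succ_mul]; ring
    · simp only [List.length_cons]; push_cast; ring

lemma pvA_char (rom : List Int) (offset size cols rows : Int) :
    decode_solution_bitfield rom offset size cols rows =
      (List.range rows.toNat).map
        (fun r => (List.range cols.toNat).map (fun c => pvBit rom offset size (r * cols.toNat + c))) := by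
  unfold decode_solution_bitfield
  have h0 : ((0 : Nat) : Int) = (0 : Int) := rfl
  rw [← h0, pvA_outer_fold]
  simp [PySem.List.length_pyRange_one]

lemma pvB_flat (rom : List Int) (offset : Int) (n : Nat) :
    ((List.range n).map (fun k => ((k : Nat) : Int))).foldl (pvBByte rom offset) [] =
      (List.range (n * 8)).map (pvRaw rom offset) := by
  induction n with
  | zero => simp
  | succ n ih =>
    rw [List.range_succ, List.map_append, List.foldl_append, ih]
    simp only [List.map_cons, List.map_nil, List.foldl_cons, List.foldl_nil]
    have h8 : (n + 1) * 8 = n * 8 + 8 := by ring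
    rw [h8, List.range_add, List.map_append]
    unfold pvBByte
    simp only []
    congr 1
    have hr : PySem.List.pyRange 0 8 1 = (List.range 8).map (fun k => ((k : Nat) : Int)) := by
      decide
    rw [hr]; simp only [List.map_map]
    apply List.map_congr_left
    intro p hp
    have hp8 : p < 8 := List.mem_range.mp hp
    unfold pvRaw
    have h1 : (n * 8 + p) / 8 = n := by omega
    have h2 : (n * 8 + p) % 8 = p := by omega
    simp [Function.comp, h1, h2, Int.shiftRight_natCast_right]

lemma pvB_flat2 (rom : List Int) (offset size : Int) (nb T : Nat)
    (hnb : nb = min size.toNat ((T + 7) / 8)) :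
    (if ((((List.range (nb * 8)).map (pvRaw rom offset)).length : Nat) : Int) < ((T : Nat) : Int) then
       ((List.range (nb * 8)).map (pvRaw rom offset)) ++
         List.replicate (((T : Nat) : Int) - ((((List.range (nb * 8)).map (pvRaw rom offset)).length : Nat) : Int)).toNat false
     else PySem.List.slice ((List.range (nb * 8)).map (pvRaw rom offset)) none (some ((T : Nat) : Int))) =
      (List.range T).map (pvBit rom offset size) := by
  simp only [List.length_map, List.length_range]
  by_cases hcase : ((nb * 8 : Nat) : Int) < (T : Int)
  · -- padding case: nb = size.toNat, bits beyond the cutoff are false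
    have hlt : nb * 8 < T := by exact_mod_cast hcase
    have hM : T ≤ ((T + 7) / 8) * 8 := by omega
    have hnbs : nb = size.toNat := by omega
    rw [if_pos hcase]
    have hsplit : T = nb * 8 + (T - nb * 8) := by omega
    rw [hsplit, List.range_add, List.map_append]
    congr 1
    · apply List.map_congr_left
      intro k hk
      have hk' : k < nb * 8 := List.mem_range.mp hk
      have : ((k / 8 : Nat) : Int) < size := by omega
      simp only [pvBit]; rw [if_pos this]
    · have hall : ∀ p : Nat, pvBit rom offset size (nb * 8 + p) = false := by
        intro p
        have : ¬ ((( (nb * 8 + p) / 8 : Nat) : Int) < size) := by omega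
        simp only [pvBit]; rw [if_neg this]
      rw [List.map_map]
      have : (pvBit rom offset size ∘ fun x => nb * 8 + x) = fun _ => false := by
        funext p; simpa using hall p
      rw [this, List.map_const']
      simp only [List.length_range]
      congr 1
      omega
  · -- truncation case: nb*8 ≥ T, take the first T bits
    rw [if_neg hcase]
    have hge : T ≤ nb * 8 := by omega
    rw [PySem.List.slice_to_natCast, ← List.map_take, List.take_range, Nat.min_eq_left hge]
    apply List.map_congr_left
    intro k hk
    have hk' : k < T := List.mem_range.mp hk
    have hkd : k / 8 < nb := by omega
    have : ((k / 8 : Nat) : Int) < size := by omega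
    simp only [pvBit]; rw [if_pos this]

-- slices of the flat bit list are exactly the rows
lemma pvB_row (rom : List Int) (offset size : Int) (R C r : Nat) (hr : r < R) :
    ((((List.range (R * C)).map (pvBit rom offset size)).drop (r * C)).take C) =
      (List.range C).map (fun c => pvBit rom offset size (r * C + c)) := by
  have hsplit : R * C = r * C + (R - r) * C := by
    have : r * C + (R - r) * C = R * C := by
      rw [← Nat.add_mul]; congr 1; omega
    omega
  have hlen : ((List.range (r * C)).map (pvBit rom offset size)).length = r * C := by simp
  have hC : C ≤ (R - r) * C := Nat.le_mul_of_pos_left C (by omega)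
  rw [hsplit, List.range_add, List.map_append, List.drop_left' hlen, List.map_map,
    ← List.map_take, List.take_range, Nat.min_eq_left hC]
  simp [Function.comp]

-- ===== VERDICT (by name: the statement is the Claim_ definition above) =====
theorem decode_solution_bitfield_spec : Claim_equal_decode_solution_bitfield := by
  intro rom offset size cols rows _ _
  unfold Spec_decode_solution_bitfield decode_solution_bitfield_alt
  rw [pvA_char]
  have hpy : ∀ (m : Int), PySem.List.pyRange 0 m 1 = (List.range m.toNat).map (fun k => ((k : Nat) : Int)) := by
    intro m; rw [PySem.List.pyRange_one]; simp
  by_cases hrows : 0 < rows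
  · by_cases hcols : 0 < cols
    · -- main case: a nonempty grid
      have hc : cols = ((cols.toNat : Nat) : Int) := by omega
      have hrw : rows = ((rows.toNat : Nat) : Int) := by omega
      set C := cols.toNat with hCdef
      set R := rows.toNat with hRdef
      have hR0 : 0 < R := by omega
      have hC0 : 0 < C := by omega
      have hT : 0 < R * C := Nat.mul_pos hR0 hC0
      have htot : cols * rows = ((R * C : Nat) : Int) := by rw [hc, hrw]; push_cast; ring
      have hfd : PySem.Int.floordiv (((R * C : Nat) : Int) + 7) 8 = (((R * C + 7) / 8 : Nat) : Int) := by
        exact_mod_cast PySem.Int.floordiv_natCast (R * C + 7) 8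
      have h0T : (0 : Int) < ((R * C : Nat) : Int) := by exact_mod_cast hT
      simp only [if_pos (And.intro hrows hcols), htot, if_pos h0T, hfd]
      set nb := (min size (((R * C + 7) / 8 : Nat) : Int)).toNat with hnbdef
      have hnb : nb = min size.toNat ((R * C + 7) / 8) := by omega
      rw [hpy (min size (((R * C + 7) / 8 : Nat) : Int))]
      rw [pvB_flat, pvB_flat2 rom offset size nb (R * C) hnb]
      rw [hpy rows, List.map_map]
      apply List.map_congr_left
      intro r hr
      have hrR : r < R := List.mem_range.mp hr
      have e1 : ((r : Nat) : Int) * cols = ((r * C : Nat) : Int) := by rw [hc]; push_cast; ring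
      have e2 : (((r : Nat) : Int) + 1) * cols = ((r * C : Nat) : Int) + ((C : Nat) : Int) := by
        rw [hc]; push_cast; ring
      simp only [Function.comp]
      rw [e1, e2, PySem.List.slice_natCast_add, pvB_row rom offset size R C r hrR]
    · -- rows > 0, cols ≤ 0: every row is empty
      have hCz : cols.toNat = 0 := by omega
      have hguard : ¬ (0 < rows ∧ 0 < cols) := by omega
      have hsl : ∀ (a b : Int), PySem.List.slice ([] : List Bool) (some a) (some b) = [] := by
        intro a b; simp [PySem.List.slice]
      have hsl2 : PySem.List.slice ([] : List Bool) none (some (0 : Int)) = [] := by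
        simp [PySem.List.slice]
      simp only [hCz, if_neg hguard, List.range_zero, List.map_nil, hpy rows, List.map_map]
      simp only [Function.comp_def]
      simp [hsl2, hsl, List.map_const']
  · -- rows ≤ 0: no rows at all
    have hRz : rows.toNat = 0 := by omega
    simp [hRz, PySem.List.pyRange_one_eq_nil (le_of_not_gt hrows)]
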